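-- pv_equiv track=rewrite | github.com/jackmusick/bifrost | scripts/audit_manifest_inventory.py | workflow_prefix_counts
-- ===== SOURCE A (Python) =====
-- from collections import Counter
--
-- def workflow_prefix_counts(entries: dict[str, dict]) -> Counter[str]:
--     counts: Counter[str] = Counter()
--     for meta in entries.values():
--         path = meta.get("path", "")
--         if path.startswith("features/"):
--             counts["features"] += 1
--         elif path.startswith("shared/"):
--             counts["shared"] += 1
--         elif path.startswith("workflows/"):
--             counts["legacy_workflows"] += 1
--         else:
--             counts["other"] += 1
--     return counts
-- ===== SOURCE B (Python) =====
-- from collections import Counter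
--
-- _LABELS = {"features": "features", "shared": "shared", "workflows": "legacy_workflows"}
--
-- def _classify(path):
--     head, sep, _tail = path.partition("/")
--     return _LABELS.get(head, "other") if sep else "other"
--
-- def workflow_prefix_counts(entries):
--     labels = [_classify(meta.get("path", "")) for meta in entries.values()]
--     counts = Counter()
--     for lab in dict.fromkeys(labels):
--         counts[lab] = labels.count(lab)
--     return counts
-- ===== Notes on version B (the rewrite author's own statement) =====
-- stated objective: alternative
-- what changed: B classifies each path by its first '/'-delimited segment (str.partition plus a dict lookup) instead of A's ordered startswith ladder, and builds the result in a second stage by bulk-counting each distinct label with list.count over the staged label list instead of A's incremental per-entry Counter increments.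
import Mathlib
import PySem

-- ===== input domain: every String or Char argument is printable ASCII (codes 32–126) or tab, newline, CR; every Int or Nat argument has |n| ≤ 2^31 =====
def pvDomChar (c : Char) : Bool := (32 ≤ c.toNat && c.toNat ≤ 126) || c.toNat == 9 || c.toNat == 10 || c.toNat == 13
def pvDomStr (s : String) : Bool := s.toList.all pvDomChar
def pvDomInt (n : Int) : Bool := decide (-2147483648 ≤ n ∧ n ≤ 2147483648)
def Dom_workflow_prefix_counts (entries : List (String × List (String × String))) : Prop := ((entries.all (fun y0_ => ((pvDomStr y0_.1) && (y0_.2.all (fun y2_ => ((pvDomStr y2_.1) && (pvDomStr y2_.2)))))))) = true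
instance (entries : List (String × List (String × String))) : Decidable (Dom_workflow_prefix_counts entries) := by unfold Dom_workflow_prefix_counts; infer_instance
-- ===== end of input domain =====

-- B classifies each path by its FIRST '/'-delimited segment (partition + dict lookup instead of
-- A's ordered startswith ladder) and then bulk-counts each distinct label with list.count over a
-- staged label list instead of A's incremental per-entry increments (objective: alternative).

-- ===== PORT A =====
def workflow_prefix_counts (entries : List (String × List (String × String))) : List (String × Int) :=
  ((PySem.Dict.ofList entries).values.foldl (fun counts m_ =>
      let path := (PySem.Dict.ofList m_).getD "path" ""
      if PySem.Str.startswith path "features/" then counts.modify "features" 0 (· + 1)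
      else if PySem.Str.startswith path "shared/" then counts.modify "shared" 0 (· + 1)
      else if PySem.Str.startswith path "workflows/" then counts.modify "legacy_workflows" 0 (· + 1)
      else counts.modify "other" 0 (· + 1))
    PySem.Dict.empty).items

-- ===== PORT B =====
def pvLabels : PySem.Dict String String :=
  PySem.Dict.ofList [("features", "features"), ("shared", "shared"), ("workflows", "legacy_workflows")]

-- path.partition("/") ported by hand (exact): head = chars before the first '/', sep nonempty iff '/' occurs
def pvClassify (path : String) : String :=
  let cs := path.toList
  let head := cs.takeWhile (· != '/')
  if cs.any (· == '/') then pvLabels.getD (String.ofList head) "other" else "other"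

def workflow_prefix_counts_alt (entries : List (String × List (String × String))) : List (String × Int) :=
  let labels := (PySem.Dict.ofList entries).values.map
      (fun m_ => pvClassify ((PySem.Dict.ofList m_).getD "path" ""))
  ((PySem.List.dedup labels).foldl
      (fun counts lab => counts.insert lab ((PySem.List.count labels lab : Int)))
    PySem.Dict.empty).items

-- ===== PRECONDITION & SPEC =====
def Spec_workflow_prefix_counts (entries : List (String × List (String × String))) (out : List (String × Int)) : Prop := out = workflow_prefix_counts_alt entries
instance (entries : List (String × List (String × String))) (out : List (String × Int)) : Decidable (Spec_workflow_prefix_counts entries out) := by unfold Spec_workflow_prefix_counts; infer_instance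

-- ===== CLAIM (what is proved, stated in full; the proofs are below) =====
def Claim_equal_workflow_prefix_counts : Prop := ∀ (entries : List (String × List (String × String))), Dom_workflow_prefix_counts entries → Spec_workflow_prefix_counts entries (workflow_prefix_counts entries)

-- ===== LEMMAS AND PROOFS =====

-- "cs starts with p + '/'" is exactly "cs has a '/' and its first segment is p" (p slash-free).
theorem prefix_slash_split (p : List Char) (hp : ∀ c ∈ p, c ≠ '/') (cs : List Char) :
    (p ++ ['/']).isPrefixOf cs = (cs.any (· == '/') && (cs.takeWhile (· != '/') == p)) := by
  induction p generalizing cs with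
  | nil =>
    cases cs with
    | nil => rfl
    | cons c t =>
      by_cases h : c = '/'
      · subst h; simp [List.isPrefixOf]
      · simp [List.isPrefixOf, List.any_cons, h, Ne.symm h]
  | cons a p' ih =>
    have ha : a ≠ '/' := hp a (List.mem_cons_self ..)
    cases cs with
    | nil => rfl
    | cons c t =>
      by_cases h : c = '/'
      · subst h
        simp [List.isPrefixOf, ha]
      · rw [show ((a :: p') ++ ['/']) = a :: (p' ++ ['/']) from rfl]
        simp only [List.isPrefixOf, List.any_cons, List.takeWhile_cons,
          show (c == '/') = false by simp [h], Bool.false_or,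
          show ((c : Char) != '/') = true by simp [h], if_pos,
          ih (fun c hc => hp c (List.mem_cons_of_mem _ hc)) t, List.cons_beq_cons]
        by_cases hac : a = c
        · subst hac
          cases hany : t.any (· == '/') <;> simp
        · rw [show (a == c) = false from beq_eq_false_iff_ne.mpr hac,
              show (c == a) = false from beq_eq_false_iff_ne.mpr (Ne.symm hac)]
          simp

-- the same fact at the startswith level, instantiated per prefix
theorem sw_split (path : String) (p : List Char) (hp : ∀ c ∈ p, c ≠ '/') :
    PySem.Chars.startswith path.toList (p ++ ['/'])
      = (path.toList.any (· == '/') && (path.toList.takeWhile (· != '/') == p)) := by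
  simpa [PySem.Chars.startswith] using prefix_slash_split p hp path.toList

-- a string literal differs from String.ofList h once h differs from its char list
theorem str_beq_ofList_false (s : String) (h : List Char) (h1 : ¬ h = s.toList) :
    (s == String.ofList h) = false := by
  refine beq_eq_false_iff_ne.mpr fun e => h1 ?_
  simpa using (congrArg String.toList e).symm

-- A's ladder label equals B's first-segment classification, path by path.
theorem label_eq (path : String) :
    (if PySem.Str.startswith path "features/" then "features"
     else if PySem.Str.startswith path "shared/" then "shared"
     else if PySem.Str.startswith path "workflows/" then "legacy_workflows"
     else "other") = pvClassify path := by
  have hf : ∀ c ∈ "features".toList, c ≠ '/' := by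
    rw [show "features".toList = ['f','e','a','t','u','r','e','s'] by decide]; simp
  have hs : ∀ c ∈ "shared".toList, c ≠ '/' := by
    rw [show "shared".toList = ['s','h','a','r','e','d'] by decide]; simp
  have hw : ∀ c ∈ "workflows".toList, c ≠ '/' := by
    rw [show "workflows".toList = ['w','o','r','k','f','l','o','w','s'] by decide]; simp
  unfold pvClassify
  simp only [PySem.Str.startswith,
    show ("features/".toList) = ("features".toList ++ ['/']) by decide,
    show ("shared/".toList) = ("shared".toList ++ ['/']) by decide,
    show ("workflows/".toList) = ("workflows".toList ++ ['/']) by decide,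
    sw_split path ("features".toList) hf, sw_split path ("shared".toList) hs,
    sw_split path ("workflows".toList) hw]
  cases hany : (path.toList.any (· == '/')) with
  | false => simp
  | true =>
    simp only [Bool.true_and, if_true]
    set h := path.toList.takeWhile (· != '/') with hh
    by_cases h1 : h = "features".toList
    · simp only [h1]; decide
    · by_cases h2 : h = "shared".toList
      · simp only [h2]; decide
      · by_cases h3 : h = "workflows".toList
        · simp only [h3]; decide
        · rw [show (h == "features".toList) = false from beq_eq_false_iff_ne.mpr h1,
              show (h == "shared".toList) = false from beq_eq_false_iff_ne.mpr h2,
              show (h == "workflows".toList) = false from beq_eq_false_iff_ne.mpr h3,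
              show pvLabels = PySem.Dict.mk
                [("features", "features"), ("shared", "shared"), ("workflows", "legacy_workflows")]
                by decide,
              PySem.Dict.getD_eq_get?_getD,
              PySem.Dict.get?_mk_cons, str_beq_ofList_false "features" h h1,
              PySem.Dict.get?_mk_cons, str_beq_ofList_false "shared" h h2,
              PySem.Dict.get?_mk_cons, str_beq_ofList_false "workflows" h h3]
          simp [PySem.Dict.get?]

-- One step of A's ladder is "bump the counter at B's label".
theorem ladder_step_eq (counts : PySem.Dict String Int) (path : String) :
    (if PySem.Str.startswith path "features/" then counts.modify "features" 0 (· + 1)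
     else if PySem.Str.startswith path "shared/" then counts.modify "shared" 0 (· + 1)
     else if PySem.Str.startswith path "workflows/" then counts.modify "legacy_workflows" 0 (· + 1)
     else counts.modify "other" 0 (· + 1))
    = counts.modify (pvClassify path) 0 (· + 1) := by
  rw [← label_eq path]
  split_ifs <;> rfl

-- ===== VERDICT (by name: the statement is the Claim_ definition above) =====
theorem workflow_prefix_counts_spec : Claim_equal_workflow_prefix_counts := by
  intro entries _
  show workflow_prefix_counts entries = workflow_prefix_counts_alt entries
  unfold workflow_prefix_counts workflow_prefix_counts_alt
  generalize (PySem.Dict.ofList entries).values = vals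
  show _ = ((PySem.List.dedup (vals.map (fun m_ => pvClassify ((PySem.Dict.ofList m_).getD "path" "")))).foldl
      (fun counts lab => counts.insert lab
        ((PySem.List.count (vals.map (fun m_ => pvClassify ((PySem.Dict.ofList m_).getD "path" ""))) lab : Int)))
    PySem.Dict.empty).items
  have hA : (vals.foldl (fun counts m_ =>
      let path := (PySem.Dict.ofList m_).getD "path" ""
      if PySem.Str.startswith path "features/" then counts.modify "features" 0 (· + 1)
      else if PySem.Str.startswith path "shared/" then counts.modify "shared" 0 (· + 1)
      else if PySem.Str.startswith path "workflows/" then counts.modify "legacy_workflows" 0 (· + 1)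
      else counts.modify "other" 0 (· + 1))
    PySem.Dict.empty)
      = PySem.Dict.counter (vals.map (fun m_ => pvClassify ((PySem.Dict.ofList m_).getD "path" ""))) := by
    rw [PySem.Dict.counter_eq_foldl, List.foldl_map]
    exact PySem.List.foldl_congr_mem _ _ _ _
      (fun d m _ => ladder_step_eq d ((PySem.Dict.ofList m).getD "path" ""))
  rw [hA, PySem.Dict.items_counter, PySem.List.dedup_eq_ofList,
      PySem.Dict.items_foldl_insert_fresh _ (fun a => a) _ PySem.Dict.empty
        (fun a _ => PySem.Dict.contains_empty a)
        (by simp [PySem.Set.nodup_ofList])]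
  simp [PySem.List.count, PySem.Dict.empty]
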